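-- pv_equiv track=rewrite | github.com/AlexGaithuma/Identification-of-Serpins-from-whole-genome | Find_and_rename_serpins_with_old_names.py | scan_motifs_gap
-- ===== SOURCE A (Python) =====
-- def hamming(seq1, seq2):
--     """Count mismatched positions (strings must be same length)."""
--     return sum(a != b for a, b in zip(seq1, seq2))
--
-- def scan_motifs_gap(seq, motif_seq, max_mismatches):
--     """
--     Allow a single gap (deletion) in motif or sequence.
--     Returns: [(mismatches,start,end,window,gap_pos,gap_type)]
--     """
--     mlen, res = len(motif_seq), []
--     # (1) Gap in motif: remove each motif position
--     for gap in range(mlen):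
--         motif_gapped = motif_seq[:gap] + motif_seq[gap+1:]
--         winlen = mlen - 1
--         for i in range(len(seq) - winlen + 1):
--             window = seq[i:i+winlen]
--             mismatches = hamming(window, motif_gapped)
--             if mismatches <= max_mismatches:
--                 res.append((mismatches, i+1, i+winlen, window, gap+1, "motif_gap"))
--     # (2) Gap in sequence: remove each pos from window
--     for gap in range(mlen):
--         winlen = mlen
--         for i in range(len(seq) - winlen + 1):
--             window_full = seq[i:i+winlen]
--             if len(window_full) < winlen: continue
--             window_gapped = window_full[:gap] + window_full[gap+1:]
--             if len(window_gapped) != mlen-1: continue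
--             mismatches = hamming(window_gapped, motif_seq[:gap] + motif_seq[gap+1:])
--             if mismatches <= max_mismatches:
--                 res.append((mismatches, i+1, i+winlen-1, window_gapped, gap+1, "seq_gap"))
--     return res
-- ===== SOURCE B (Python) =====
-- def _mis(seq, motif_seq, idx, t):
--     """1 if position idx of seq (when in range) mismatches motif position t, else 0."""
--     return 1 if 0 <= idx < len(seq) and seq[idx] != motif_seq[t] else 0
--
-- def _prefix_tables(seq, motif_seq):
--     """P[d+1][t] = mismatches between seq[d:d+t] and motif_seq[:t] (diagonal d)."""
--     n, m = len(seq), len(motif_seq)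
--     P = []
--     for d in range(-1, n - m + 2):
--         row = [0]
--         for t in range(m):
--             row.append(row[-1] + _mis(seq, motif_seq, d + t, t))
--         P.append(row)
--     return P
--
-- def scan_motifs_gap(seq, motif_seq, max_mismatches):
--     """
--     Allow a single gap (deletion) in motif or sequence.
--     Returns: [(mismatches,start,end,window,gap_pos,gap_type)]
--     Diagonal prefix-sum tables give each gapped window's mismatch count in O(1).
--     """
--     n, m = len(seq), len(motif_seq)
--     if m == 0:
--         return []
--     P = _prefix_tables(seq, motif_seq)
--     res = []
--     # (1) Gap in motif
--     for gap in range(m):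
--         for i in range(n - m + 2):
--             mis = P[i + 1][gap] + (P[i][m] - P[i][gap + 1])
--             if mis <= max_mismatches:
--                 res.append((mis, i + 1, i + m - 1, seq[i:i + m - 1], gap + 1, "motif_gap"))
--     # (2) Gap in sequence
--     for gap in range(m):
--         for i in range(n - m + 1):
--             mis = P[i + 1][m] - (P[i + 1][gap + 1] - P[i + 1][gap])
--             if mis <= max_mismatches:
--                 res.append((mis, i + 1, i + m - 1, seq[i:i + gap] + seq[i + gap + 1:i + m], gap + 1, "seq_gap"))
--     return res
-- ===== Notes on version B (the rewrite author's own statement) =====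
-- stated objective: faster
-- what changed: B precomputes per-diagonal prefix-sum mismatch tables once, so each gapped window's mismatch count is two O(1) prefix-sum differences instead of a fresh O(m) Hamming scan per (gap, position) pair.
import Mathlib
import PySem

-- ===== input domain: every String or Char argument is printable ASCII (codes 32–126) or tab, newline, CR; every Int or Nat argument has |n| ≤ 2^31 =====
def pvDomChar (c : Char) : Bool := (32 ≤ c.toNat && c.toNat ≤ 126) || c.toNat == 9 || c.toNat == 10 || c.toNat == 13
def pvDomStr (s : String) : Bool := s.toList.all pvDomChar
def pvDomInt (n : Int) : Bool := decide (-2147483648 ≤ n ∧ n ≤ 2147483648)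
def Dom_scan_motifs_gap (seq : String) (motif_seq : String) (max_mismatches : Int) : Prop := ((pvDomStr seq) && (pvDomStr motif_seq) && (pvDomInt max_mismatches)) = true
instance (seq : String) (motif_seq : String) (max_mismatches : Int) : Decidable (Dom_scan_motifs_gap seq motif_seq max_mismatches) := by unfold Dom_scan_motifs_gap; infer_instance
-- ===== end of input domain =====

-- B replaces A's per-(gap,position) O(m) Hamming rescans by diagonal prefix-sum mismatch
-- tables built once, reading each gapped window's mismatch count off in O(1) (objective: faster).

-- ===== PORT A =====
def pvHamming (seq1 seq2 : List Char) : Int :=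
  ((seq1.zip seq2).map (fun p => if p.1 ≠ p.2 then (1 : Int) else 0)).sum

def scan_motifs_gap (seq : String) (motif_seq : String) (max_mismatches : Int) :
    List (Int × Int × Int × String × Int × String) :=
  let S := seq.toList
  let M := motif_seq.toList
  let mlen : Int := (M.length : Int)
  let res :=
    (PySem.List.pyRange 0 mlen).foldl (fun res gap =>
      let motif_gapped := PySem.List.slice M none (some gap) ++ PySem.List.slice M (some (gap + 1)) none
      let winlen := mlen - 1
      (PySem.List.pyRange 0 ((S.length : Int) - winlen + 1)).foldl (fun res i =>
        let window := PySem.List.slice S (some i) (some (i + winlen))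
        let mismatches := pvHamming window motif_gapped
        if mismatches ≤ max_mismatches then
          res ++ [(mismatches, i + 1, i + winlen, String.ofList window, gap + 1, "motif_gap")]
        else res) res) []
  (PySem.List.pyRange 0 mlen).foldl (fun res gap =>
    let winlen := mlen
    (PySem.List.pyRange 0 ((S.length : Int) - winlen + 1)).foldl (fun res i =>
      let window_full := PySem.List.slice S (some i) (some (i + winlen))
      if ((window_full.length : Int) < winlen) then res
      else
        let window_gapped := PySem.List.slice window_full none (some gap) ++ PySem.List.slice window_full (some (gap + 1)) none
        if ((window_gapped.length : Int) ≠ mlen - 1) then res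
        else
          let mismatches := pvHamming window_gapped (PySem.List.slice M none (some gap) ++ PySem.List.slice M (some (gap + 1)) none)
          if mismatches ≤ max_mismatches then
            res ++ [(mismatches, i + 1, i + winlen - 1, String.ofList window_gapped, gap + 1, "seq_gap")]
          else res) res) res

-- ===== PORT B =====
def pvMis (seq motif_seq : List Char) (idx t : Int) : Int :=
  if 0 ≤ idx ∧ idx < (seq.length : Int) ∧ PySem.List.pyGet? seq idx ≠ PySem.List.pyGet? motif_seq t then 1 else 0

def pvPrefixTables (seq motif_seq : List Char) : List (List Int) :=
  let n : Int := (seq.length : Int)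
  let m : Int := (motif_seq.length : Int)
  (PySem.List.pyRange (-1) (n - m + 2)).foldl (fun P d =>
    let row := (PySem.List.pyRange 0 m).foldl (fun row t =>
      row ++ [PySem.List.pyGetD row (-1) 0 + pvMis seq motif_seq (d + t) t]) [0]
    P ++ [row]) []

def scan_motifs_gap_alt (seq : String) (motif_seq : String) (max_mismatches : Int) :
    List (Int × Int × Int × String × Int × String) :=
  let S := seq.toList
  let M := motif_seq.toList
  let n : Int := (S.length : Int)
  let m : Int := (M.length : Int)
  if m = 0 then []
  else
    let P := pvPrefixTables S M
    let res :=
      (PySem.List.pyRange 0 m).foldl (fun res gap =>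
        (PySem.List.pyRange 0 (n - m + 2)).foldl (fun res i =>
          let mis := PySem.List.pyGetD (PySem.List.pyGetD P (i + 1) []) gap 0
            + (PySem.List.pyGetD (PySem.List.pyGetD P i []) m 0
               - PySem.List.pyGetD (PySem.List.pyGetD P i []) (gap + 1) 0)
          if mis ≤ max_mismatches then
            res ++ [(mis, i + 1, i + m - 1,
              String.ofList (PySem.List.slice S (some i) (some (i + m - 1))), gap + 1, "motif_gap")]
          else res) res) []
    (PySem.List.pyRange 0 m).foldl (fun res gap =>
      (PySem.List.pyRange 0 (n - m + 1)).foldl (fun res i =>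
        let mis := PySem.List.pyGetD (PySem.List.pyGetD P (i + 1) []) m 0
          - (PySem.List.pyGetD (PySem.List.pyGetD P (i + 1) []) (gap + 1) 0
             - PySem.List.pyGetD (PySem.List.pyGetD P (i + 1) []) gap 0)
        if mis ≤ max_mismatches then
          res ++ [(mis, i + 1, i + m - 1,
            String.ofList (PySem.List.slice S (some i) (some (i + gap))
              ++ PySem.List.slice S (some (i + gap + 1)) (some (i + m))), gap + 1, "seq_gap")]
        else res) res) res

-- ===== PRECONDITION & SPEC =====
def Spec_scan_motifs_gap (seq : String) (motif_seq : String) (max_mismatches : Int) (out : List (Int × Int × Int × String × Int × String)) : Prop := out = scan_motifs_gap_alt seq motif_seq max_mismatches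
instance (seq : String) (motif_seq : String) (max_mismatches : Int) (out : List (Int × Int × Int × String × Int × String)) : Decidable (Spec_scan_motifs_gap seq motif_seq max_mismatches out) := by unfold Spec_scan_motifs_gap; infer_instance

-- ===== CLAIM (what is proved, stated in full; the proofs are below) =====
def Claim_equal_scan_motifs_gap : Prop := ∀ (seq : String) (motif_seq : String) (max_mismatches : Int), Dom_scan_motifs_gap seq motif_seq max_mismatches → Spec_scan_motifs_gap seq motif_seq max_mismatches (scan_motifs_gap seq motif_seq max_mismatches)

-- ===== LEMMAS AND PROOFS =====

-- prefix mismatch sums along diagonal d (what row d of pvPrefixTables tabulates)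
def pvPref (S M : List Char) (d : Int) (t : Nat) : Int :=
  ∑ u ∈ Finset.range t, pvMis S M (d + u) u

theorem pvHamming_cons (a b : Char) (as bs : List Char) :
    pvHamming (a :: as) (b :: bs) = (if a ≠ b then 1 else 0) + pvHamming as bs := by
  simp [pvHamming]

theorem pvHamming_append (a1 a2 b1 b2 : List Char) (h : a1.length = b1.length) :
    pvHamming (a1 ++ a2) (b1 ++ b2) = pvHamming a1 b1 + pvHamming a2 b2 := by
  simp [pvHamming, List.zip_append h]

theorem pvGetD_concat_neg_one (l : List Int) (x d : Int) :
    PySem.List.pyGetD (l ++ [x]) (-1) d = x := by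
  simp [PySem.List.pyGetD, PySem.List.pyGet?, PySem.List.pyIdx?]

theorem pvHam_eq (S M : List Char) (k : Nat) : ∀ (i j : Nat), i + k ≤ S.length → j + k ≤ M.length →
    pvHamming (List.take k (List.drop i S)) (List.take k (List.drop j M))
      = ∑ u ∈ Finset.Ico j (j + k), pvMis S M ((i : Int) - j + u) u := by
  induction k with
  | zero => intro i j hi hj; simp [pvHamming]
  | succ k ih =>
    intro i j hi hj
    have hi' : i < S.length := by omega
    have hj' : j < M.length := by omega
    rw [List.drop_eq_getElem_cons hi', List.drop_eq_getElem_cons hj',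
        List.take_succ_cons, List.take_succ_cons, pvHamming_cons,
        ih (i + 1) (j + 1) (by omega) (by omega)]
    rw [Finset.sum_eq_sum_Ico_succ_bot (by omega : j < j + (k + 1))]
    congr 1
    · have h1 : (i : Int) - j + j = ((i : Nat) : Int) := by ring
      rw [h1]
      simp only [pvMis, PySem.List.pyGet?_natCast]
      rw [List.getElem?_eq_getElem hi', List.getElem?_eq_getElem hj']
      have h2 : (0 : Int) ≤ i := by positivity
      have h3 : (i : Int) < (S.length : Int) := by exact_mod_cast hi'
      simp [h2, h3]
    · have hb : j + 1 + k = j + (k + 1) := by omega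
      rw [hb]
      apply Finset.sum_congr rfl
      intro u hu
      congr 1
      push_cast
      ring

theorem pvPref_sub (S M : List Char) (d : Int) (a b : Nat) (h : a ≤ b) :
    ∑ u ∈ Finset.Ico a b, pvMis S M (d + u) u = pvPref S M d b - pvPref S M d a := by
  rw [pvPref, pvPref, Finset.sum_Ico_eq_sub _ h]

theorem pvRow_eq (S M : List Char) (d : Int) (k : Nat) :
    ((PySem.List.pyRange 0 (k : Int)).foldl (fun row t =>
        row ++ [PySem.List.pyGetD row (-1) 0 + pvMis S M (d + t) t]) [0])
      = (List.range (k + 1)).map (fun t => pvPref S M d t) := by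
  rw [PySem.List.pyRange_one]
  have h0 : ((k : Int) - 0).toNat = k := by omega
  rw [h0, List.foldl_map]
  clear h0
  induction k with
  | zero => simp [pvPref]
  | succ k ih =>
    rw [List.range_succ, List.foldl_concat, ih]
    have hsplit : (List.range (k+1)).map (fun t => pvPref S M d t)
        = (List.range k).map (fun t => pvPref S M d t) ++ [pvPref S M d k] := by
      rw [List.range_succ, List.map_append, List.map_singleton]
    have hlast : PySem.List.pyGetD ((List.range (k+1)).map (fun t => pvPref S M d t)) (-1) 0
        = pvPref S M d k := by rw [hsplit, pvGetD_concat_neg_one]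
    rw [hlast, List.range_succ (n := k+1), List.map_append, List.map_singleton]
    congr 1
    simp [pvPref, Finset.sum_range_succ]

theorem pvP_get (S M : List Char) (d t : Int) (h1 : -1 ≤ d) (h2 : d ≤ (S.length : Int) - M.length + 1)
    (h3 : 0 ≤ t) (h4 : t ≤ (M.length : Int)) :
    PySem.List.pyGetD (PySem.List.pyGetD (pvPrefixTables S M) (d + 1) []) t 0
      = pvPref S M d t.toNat := by
  unfold pvPrefixTables
  simp only []
  rw [PySem.List.foldl_append_singleton_eq_map, List.nil_append]
  have hk : d + 1 = ((d + 1).toNat : Int) := by omega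
  rw [hk, PySem.List.pyGetD_map_pyRange_one _ _ _ _ _ (by omega : (d+1).toNat < ((S.length : Int) - M.length + 2 - (-1)).toNat)]
  have hd : -1 + ((d + 1).toNat : Int) = d := by omega
  rw [hd, pvRow_eq S M d M.length]
  rw [PySem.List.pyGetD_of_nonneg _ _ h3]
  rw [PySem.List.getD_map_range _ _ _ _ (by omega : t.toNat < M.length + 1)]

theorem pvMotifCell (S M : List Char) (gap i : Int) (hg0 : 0 ≤ gap) (hg1 : gap < (M.length : Int))
    (hi0 : 0 ≤ i) (hi1 : i < (S.length : Int) - M.length + 2) :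
    pvHamming (PySem.List.slice S (some i) (some (i + (M.length : Int) - 1)))
        (PySem.List.slice M none (some gap) ++ PySem.List.slice M (some (gap + 1)) none)
      = pvPref S M i gap.toNat + (pvPref S M (i - 1) M.length - pvPref S M (i - 1) (gap.toNat + 1)) := by
  obtain ⟨iN, rfl⟩ := Int.eq_ofNat_of_zero_le hi0
  obtain ⟨gN, rfl⟩ := Int.eq_ofNat_of_zero_le hg0
  simp only [Int.toNat_natCast]
  have hgm : gN + 1 ≤ M.length := by omega
  have him : iN + M.length ≤ S.length + 1 := by omega
  have hA : PySem.List.slice S (some (iN : Int)) (some ((iN : Int) + (M.length : Int) - 1))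
      = List.take (M.length - 1) (List.drop iN S) := by
    rw [PySem.List.slice_toNat S (by omega) (by omega)]
    congr 1
    omega
  have hM1 : PySem.List.slice M none (some (gN : Int)) = List.take gN M := by
    rw [PySem.List.slice_to M (by omega)]
    congr 1
  have hM2 : PySem.List.slice M (some ((gN : Int) + 1)) none = List.drop (gN + 1) M := by
    rw [PySem.List.slice_from M (by omega)]
    congr 1
  rw [hA, hM1, hM2]
  have hw : List.take (M.length - 1) (List.drop iN S)
      = List.take gN (List.drop iN S) ++ List.take (M.length - 1 - gN) (List.drop (iN + gN) S) := by
    rw [← List.drop_drop, ← List.take_add]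
    congr 1
    omega
  have hb1 : List.take gN M = List.take gN (List.drop 0 M) := by rw [List.drop_zero]
  have hb2 : List.drop (gN + 1) M = List.take (M.length - 1 - gN) (List.drop (gN + 1) M) := by
    rw [List.take_of_length_le (by simp; omega)]
  rw [hw, hb1, hb2]
  rw [pvHamming_append _ _ _ _ (by simp; omega)]
  rw [pvHam_eq S M gN iN 0 (by omega) (by omega)]
  rw [pvHam_eq S M (M.length - 1 - gN) (iN + gN) (gN + 1) (by omega) (by omega)]
  have hc1 : ((iN : Int)) - ((0 : Nat) : Int) = (iN : Int) := by push_cast; ring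
  have hc2 : ((iN + gN : Nat) : Int) - ((gN + 1 : Nat) : Int) = (iN : Int) - 1 := by push_cast; ring
  simp only [hc1, hc2]
  rw [show (0 : Nat) + gN = gN from by omega, show gN + 1 + (M.length - 1 - gN) = M.length from by omega]
  rw [pvPref_sub S M ((iN : Nat) : Int) 0 gN (by omega)]
  rw [pvPref_sub S M ((iN : Int) - 1) (gN + 1) M.length (by omega)]
  simp [pvPref]

theorem pvSeqCell (S M : List Char) (gap i : Int) (hg0 : 0 ≤ gap) (hg1 : gap < (M.length : Int))
    (hi0 : 0 ≤ i) (hi1 : i < (S.length : Int) - M.length + 1) :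
    (PySem.List.slice S (some i) (some (i + (M.length : Int)))).length = M.length ∧
    (PySem.List.slice (PySem.List.slice S (some i) (some (i + (M.length : Int)))) none (some gap)
       ++ PySem.List.slice (PySem.List.slice S (some i) (some (i + (M.length : Int)))) (some (gap + 1)) none).length
      = M.length - 1 ∧
    (PySem.List.slice (PySem.List.slice S (some i) (some (i + (M.length : Int)))) none (some gap)
       ++ PySem.List.slice (PySem.List.slice S (some i) (some (i + (M.length : Int)))) (some (gap + 1)) none
      = PySem.List.slice S (some i) (some (i + gap)) ++ PySem.List.slice S (some (i + gap + 1)) (some (i + (M.length : Int)))) ∧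
    pvHamming (PySem.List.slice (PySem.List.slice S (some i) (some (i + (M.length : Int)))) none (some gap)
       ++ PySem.List.slice (PySem.List.slice S (some i) (some (i + (M.length : Int)))) (some (gap + 1)) none)
        (PySem.List.slice M none (some gap) ++ PySem.List.slice M (some (gap + 1)) none)
      = pvPref S M i M.length - (pvPref S M i (gap.toNat + 1) - pvPref S M i gap.toNat) := by
  obtain ⟨iN, rfl⟩ := Int.eq_ofNat_of_zero_le hi0
  obtain ⟨gN, rfl⟩ := Int.eq_ofNat_of_zero_le hg0
  simp only [Int.toNat_natCast]
  have hgm : gN + 1 ≤ M.length := by omega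
  have him : iN + M.length ≤ S.length := by omega
  have hW : PySem.List.slice S (some (iN : Int)) (some ((iN : Int) + (M.length : Int)))
      = List.take M.length (List.drop iN S) := by
    rw [PySem.List.slice_toNat S (by omega) (by omega)]
    congr 1
    omega
  have hW1 : List.take gN (List.take M.length (List.drop iN S)) = List.take gN (List.drop iN S) := by
    rw [List.take_take, show min gN M.length = gN from by omega]
  have hW2 : List.drop (gN + 1) (List.take M.length (List.drop iN S))
      = List.take (M.length - gN - 1) (List.drop (iN + gN + 1) S) := by
    rw [List.drop_take, List.drop_drop]
    congr 1
  have hG1 : PySem.List.slice (List.take M.length (List.drop iN S)) none (some (gN : Int))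
      = List.take gN (List.drop iN S) := by
    rw [PySem.List.slice_to _ (by omega)]
    rw [Int.toNat_natCast, hW1]
  have hG2 : PySem.List.slice (List.take M.length (List.drop iN S)) (some ((gN : Int) + 1)) none
      = List.take (M.length - gN - 1) (List.drop (iN + gN + 1) S) := by
    rw [PySem.List.slice_from _ (by omega)]
    rw [show ((gN : Int) + 1).toNat = gN + 1 from by omega, hW2]
  have hB1 : PySem.List.slice S (some (iN : Int)) (some ((iN : Int) + (gN : Int)))
      = List.take gN (List.drop iN S) := by
    rw [PySem.List.slice_toNat S (by omega) (by omega)]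
    congr 1
    omega
  have hB2 : PySem.List.slice S (some ((iN : Int) + (gN : Int) + 1)) (some ((iN : Int) + (M.length : Int)))
      = List.take (M.length - gN - 1) (List.drop (iN + gN + 1) S) := by
    rw [PySem.List.slice_toNat S (by omega) (by omega)]
    congr 1
    omega
  have hM1 : PySem.List.slice M none (some (gN : Int)) = List.take gN (List.drop 0 M) := by
    rw [PySem.List.slice_to M (by omega), List.drop_zero]
    congr 1
  have hM2 : PySem.List.slice M (some ((gN : Int) + 1)) none
      = List.take (M.length - gN - 1) (List.drop (gN + 1) M) := by
    rw [PySem.List.slice_from M (by omega),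
        show ((gN : Int) + 1).toNat = gN + 1 from by omega,
        List.take_of_length_le (by simp; omega)]
  have hlen1 : (List.take gN (List.drop iN S)).length = gN := by simp; omega
  have hlen2 : (List.take (M.length - gN - 1) (List.drop (iN + gN + 1) S)).length = M.length - gN - 1 := by
    simp; omega
  refine ⟨?_, ?_, ?_, ?_⟩
  · rw [hW]; simp; omega
  · rw [hW, hG1, hG2]
    simp only [List.length_append, hlen1, hlen2]
    omega
  · rw [hW, hG1, hG2, hB1, hB2]
  · rw [hW, hG1, hG2, hM1, hM2]
    rw [pvHamming_append _ _ _ _ (by simp; omega)]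
    rw [pvHam_eq S M gN iN 0 (by omega) (by omega)]
    rw [pvHam_eq S M (M.length - gN - 1) (iN + gN + 1) (gN + 1) (by omega) (by omega)]
    have hc1 : ((iN : Int)) - ((0 : Nat) : Int) = (iN : Int) := by push_cast; ring
    have hc2 : ((iN + gN + 1 : Nat) : Int) - ((gN + 1 : Nat) : Int) = (iN : Int) := by push_cast; ring
    simp only [hc1, hc2]
    rw [show (0 : Nat) + gN = gN from by omega, show gN + 1 + (M.length - gN - 1) = M.length from by omega]
    rw [pvPref_sub S M ((iN : Nat) : Int) 0 gN (by omega)]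
    rw [pvPref_sub S M ((iN : Nat) : Int) (gN + 1) M.length (by omega)]
    have h0 : pvPref S M ((iN : Nat) : Int) 0 = 0 := by simp [pvPref]
    rw [h0]
    ring

theorem pvFoldl2_congr {α β γ : Type} (l1 : List α) (l2 : List γ)
    (f g : List β → α → List β) (F G : List β → γ → List β) (i1 i2 : List β)
    (hinit : List.foldl f i1 l1 = List.foldl g i2 l1)
    (h : ∀ (acc : List β), ∀ x ∈ l2, F acc x = G acc x) :
    List.foldl F (List.foldl f i1 l1) l2 = List.foldl G (List.foldl g i2 l1) l2 := by
  rw [hinit]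
  exact PySem.List.foldl_congr_mem _ _ _ _ h

-- ===== VERDICT (by name: the statement is the Claim_ definition above) =====
set_option maxHeartbeats 1000000 in
theorem scan_motifs_gap_spec : Claim_equal_scan_motifs_gap := by
  intro seq motif_seq mm _
  unfold Spec_scan_motifs_gap
  by_cases hm : ((motif_seq.toList.length : Int) = 0)
  · have hM : motif_seq.toList = [] := by
      have : motif_seq.toList.length = 0 := by exact_mod_cast hm
      exact List.length_eq_zero_iff.mp this
    rw [scan_motifs_gap, scan_motifs_gap_alt]
    simp only [hM]
    rfl
  · rw [scan_motifs_gap, scan_motifs_gap_alt]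
    simp only [if_neg hm]
    generalize seq.toList = S
    generalize hMM : motif_seq.toList = M at hm
    simp only [show ((S.length : Int) - ((M.length : Int) - 1) + 1 : Int) = (S.length : Int) - (M.length : Int) + 2 from by ring]
    simp only [← add_sub_assoc]
    apply pvFoldl2_congr
    · -- part 1: gap in motif
      apply PySem.List.foldl_congr_mem
      intro acc gap hgap
      rw [PySem.List.mem_pyRange_one] at hgap
      apply PySem.List.foldl_congr_mem
      intro acc2 i hi
      rw [PySem.List.mem_pyRange_one] at hi
      have e1 : PySem.List.pyGetD (PySem.List.pyGetD (pvPrefixTables S M) (i + 1) []) gap 0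
          = pvPref S M i gap.toNat :=
        pvP_get S M i gap (by omega) (by omega) hgap.1 (by omega)
      have e2 : PySem.List.pyGetD (PySem.List.pyGetD (pvPrefixTables S M) i []) (↑M.length) 0
          = pvPref S M (i - 1) M.length := by
        have h := pvP_get S M (i - 1) (↑M.length) (by omega) (by omega) (by omega) (by omega)
        rw [show (i - 1) + 1 = i from by ring] at h
        simpa using h
      have e3 : PySem.List.pyGetD (PySem.List.pyGetD (pvPrefixTables S M) i []) (gap + 1) 0
          = pvPref S M (i - 1) (gap.toNat + 1) := by
        have h := pvP_get S M (i - 1) (gap + 1) (by omega) (by omega) (by omega) (by omega)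
        rw [show (i - 1) + 1 = i from by ring,
            show (gap + 1).toNat = gap.toNat + 1 from by omega] at h
        exact h
      rw [e1, e2, e3, pvMotifCell S M gap i hgap.1 hgap.2 hi.1 hi.2]
      simp only [add_sub_assoc]
    · -- part 2: gap in sequence
      intro acc gap hgap
      rw [PySem.List.mem_pyRange_one] at hgap
      apply PySem.List.foldl_congr_mem
      intro acc2 i hi
      rw [PySem.List.mem_pyRange_one] at hi
      obtain ⟨c1, c2, c3, c4⟩ := pvSeqCell S M gap i hgap.1 hgap.2 hi.1 hi.2
      have f1 : PySem.List.pyGetD (PySem.List.pyGetD (pvPrefixTables S M) (i + 1) []) (↑M.length) 0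
          = pvPref S M i M.length := by
        have h := pvP_get S M i (↑M.length) (by omega) (by omega) (by omega) (by omega)
        simpa using h
      have f2 : PySem.List.pyGetD (PySem.List.pyGetD (pvPrefixTables S M) (i + 1) []) (gap + 1) 0
          = pvPref S M i (gap.toNat + 1) := by
        have h := pvP_get S M i (gap + 1) (by omega) (by omega) (by omega) (by omega)
        rw [show (gap + 1).toNat = gap.toNat + 1 from by omega] at h
        exact h
      have f3 : PySem.List.pyGetD (PySem.List.pyGetD (pvPrefixTables S M) (i + 1) []) gap 0
          = pvPref S M i gap.toNat :=
        pvP_get S M i gap (by omega) (by omega) hgap.1 (by omega)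
      rw [c1, if_neg (lt_irrefl _), c2, if_neg (by omega), c4, c3, f1, f2, f3]
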